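-- pv_equiv track=rewrite | github.com/IsaacStanley-me/paypal-django | tools/auto_translate_po.py | extract_msgid_msgstr
-- ===== SOURCE A (Python) =====
-- from typing import Optional, Tuple, List
--
-- def extract_msgid_msgstr(block: List[str]) -> Tuple[Optional[int], Optional[int], str, str]:
--     msgid_idx = None
--     msgstr_idx = None
--     msgid_val = ''
--     msgstr_val = ''
--     for idx, line in enumerate(block):
--         if line.startswith('msgid '):
--             msgid_idx = idx
--             msgid_val = line.split(' ', 1)[1].strip()
--         elif line.startswith('msgstr '):
--             msgstr_idx = idx
--             msgstr_val = line.split(' ', 1)[1].strip()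
--     return msgid_idx, msgstr_idx, msgid_val, msgstr_val
-- ===== SOURCE B (Python) =====
-- def extract_msgid_msgstr(block):
--     msgid_idx = None
--     msgstr_idx = None
--     msgid_val = ''
--     msgstr_val = ''
--     for idx, line in reversed(list(enumerate(block))):
--         if msgid_idx is None and line.startswith('msgid '):
--             msgid_idx = idx
--             msgid_val = line[6:].strip()
--         elif msgstr_idx is None and line.startswith('msgstr '):
--             msgstr_idx = idx
--             msgstr_val = line[7:].strip()
--         if msgid_idx is not None and msgstr_idx is not None:
--             break
--     return msgid_idx, msgstr_idx, msgid_val, msgstr_val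
-- ===== Notes on version B (the rewrite author's own statement) =====
-- stated objective: alternative
-- what changed: A scans the block forward, overwriting state so the last 'msgid '/'msgstr ' line wins; B scans the reversed enumerated block, records only a still-missing kind on its first backward match, and breaks as soon as both kinds are found; B also takes the value by slicing off the fixed prefix instead of split(' ', 1).
import Mathlib
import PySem

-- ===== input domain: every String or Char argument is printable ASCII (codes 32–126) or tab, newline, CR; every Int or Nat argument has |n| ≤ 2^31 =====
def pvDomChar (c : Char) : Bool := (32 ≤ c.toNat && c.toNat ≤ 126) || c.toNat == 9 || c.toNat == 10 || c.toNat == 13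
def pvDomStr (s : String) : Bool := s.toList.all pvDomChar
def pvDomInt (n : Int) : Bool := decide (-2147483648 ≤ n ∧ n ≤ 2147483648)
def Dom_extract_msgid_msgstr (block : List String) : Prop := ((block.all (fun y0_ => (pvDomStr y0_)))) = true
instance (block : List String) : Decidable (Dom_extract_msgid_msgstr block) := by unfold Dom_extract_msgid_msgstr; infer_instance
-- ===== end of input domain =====

-- B replaces A's forward scan (which overwrites state so that the last match wins) by a reverse
-- scan with early exit: the first 'msgid '/'msgstr ' line met scanning backward is the last one
-- in forward order, so B stops as soon as both kinds are found (objective: alternative).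

-- ===== PORT A =====
-- line.split(' ', 1)[1].strip(); the bare [1] is exact here because A evaluates it only on a
-- line that starts with 'msgid ' / 'msgstr ', where split(' ', 1) always yields two parts.
def pvTailA (line : String) : String :=
  PySem.Str.strip (PySem.List.pyGetD ((PySem.Str.splitMax? line " " 1).getD []) 1 "")

-- A's loop body (if / elif / fall-through); state = (msgid_idx, msgstr_idx, msgid_val, msgstr_val)
def pvStepA (st : Option Int × Option Int × String × String) (p : Int × String) :
    Option Int × Option Int × String × String :=
  if PySem.Str.startswith p.2 "msgid " = true then (some p.1, st.2.1, pvTailA p.2, st.2.2.2)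
  else if PySem.Str.startswith p.2 "msgstr " = true then (st.1, some p.1, st.2.2.1, pvTailA p.2)
  else st

def extract_msgid_msgstr (block : List String) : Option Int × Option Int × String × String :=
  (PySem.List.enumerate block 0).foldl pvStepA (none, none, "", "")

-- ===== PORT B =====
-- B's loop body: fill a field only while it is still missing (line[6:]/[7:] = slice from 6/7)
def pvStepB (st : Option Int × Option Int × String × String) (p : Int × String) :
    Option Int × Option Int × String × String :=
  if st.1 = none ∧ PySem.Str.startswith p.2 "msgid " = true then
    (some p.1, st.2.1, PySem.Str.strip (PySem.Str.slice p.2 (some 6) none), st.2.2.2)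
  else if st.2.1 = none ∧ PySem.Str.startswith p.2 "msgstr " = true then
    (st.1, some p.1, st.2.2.1, PySem.Str.strip (PySem.Str.slice p.2 (some 7) none))
  else st

-- B's loop over reversed(list(enumerate(block))), with break once both kinds are found
def pvAltGo : List (Int × String) → (Option Int × Option Int × String × String) →
    Option Int × Option Int × String × String
  | [], st => st
  | p :: rest, st =>
    let st' := pvStepB st p
    if st'.1.isSome ∧ st'.2.1.isSome then st' else pvAltGo rest st'

def extract_msgid_msgstr_alt (block : List String) : Option Int × Option Int × String × String :=
  pvAltGo (PySem.List.enumerate block 0).reverse (none, none, "", "")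

-- ===== PRECONDITION & SPEC =====
def Spec_extract_msgid_msgstr (block : List String) (out : Option Int × Option Int × String × String) : Prop := out = extract_msgid_msgstr_alt block
instance (block : List String) (out : Option Int × Option Int × String × String) : Decidable (Spec_extract_msgid_msgstr block out) := by unfold Spec_extract_msgid_msgstr; infer_instance

-- ===== CLAIM (what is proved, stated in full; the proofs are below) =====
def Claim_equal_extract_msgid_msgstr : Prop := ∀ (block : List String), Dom_extract_msgid_msgstr block → Spec_extract_msgid_msgstr block (extract_msgid_msgstr block)

-- ===== LEMMAS AND PROOFS =====

-- B's state, with its still-missing fields filled in from a fully scanned result r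
def pvMerge (st r : Option Int × Option Int × String × String) :
    Option Int × Option Int × String × String :=
  (if st.1.isSome then st.1 else r.1,
   if st.2.1.isSome then st.2.1 else r.2.1,
   if st.1.isSome then st.2.2.1 else r.2.2.1,
   if st.2.1.isSome then st.2.2.2 else r.2.2.2)

-- invariant of B's state: a value field is still '' while its index is still None
def pvInv (st : Option Int × Option Int × String × String) : Prop :=
  (st.1 = none → st.2.2.1 = "") ∧ (st.2.1 = none → st.2.2.2 = "")

theorem pv_go_m0 (sep l cur : List Char) (acc : List (List Char)) (fuel : Nat) :
    PySem.Chars.splitOnMax.go sep (fuel + 1) 0 l cur acc = ((cur.reverse ++ l) :: acc).reverse := by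
  cases l <;> simp [PySem.Chars.splitOnMax.go]

theorem pv_go_scan (pre : List Char) (fuel : Nat) (rest cur : List Char)
    (acc : List (List Char)) (hf : pre.length + 1 < fuel) (hp : ' ' ∉ pre) :
    PySem.Chars.splitOnMax.go [' '] fuel 1 (pre ++ ' ' :: rest) cur acc
      = (rest :: (cur.reverse ++ pre) :: acc).reverse := by
  induction pre generalizing fuel cur with
  | nil =>
    obtain ⟨f, rfl⟩ : ∃ f, fuel = f + 1 := ⟨fuel - 1, by omega⟩
    obtain ⟨g, rfl⟩ : ∃ g, f = g + 1 := ⟨f - 1, by omega⟩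
    simp [PySem.Chars.splitOnMax.go, pv_go_m0]
  | cons c cs ih =>
    obtain ⟨f, rfl⟩ : ∃ f, fuel = f + 1 := ⟨fuel - 1, by omega⟩
    have hc : c ≠ ' ' := fun hh => hp (hh ▸ List.mem_cons_self)
    have hcs : ' ' ∉ cs := fun hh => hp (List.mem_cons_of_mem _ hh)
    have hstep : [' '].isPrefixOf (c :: (cs ++ ' ' :: rest)) = false := by
      simp [List.isPrefixOf]; exact fun hh => hc hh.symm
    simp only [List.cons_append, PySem.Chars.splitOnMax.go, hstep]
    rw [if_neg (by omega), if_neg (by simp)]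
    rw [ih f (c :: cur) (by simp at hf ⊢; omega) hcs]
    simp

theorem pv_splitMax_prefix (pre rest : List Char) (hp : ' ' ∉ pre) :
    PySem.Chars.splitMax? (pre ++ ' ' :: rest) [' '] 1 = some [pre, rest] := by
  simp only [PySem.Chars.splitMax?, PySem.Chars.splitOnMax]
  norm_num
  rw [pv_go_scan pre _ rest [] [] (by omega) hp]
  simp

theorem pv_not_both (line : String) (h : PySem.Str.startswith line "msgid " = true) :
    PySem.Str.startswith line "msgstr " = false := by
  by_contra hc
  rw [Bool.not_eq_false] at hc
  simp only [PySem.Str.startswith_eq, PySem.Chars.startswith_iff] at h hc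
  rcases List.prefix_or_prefix_of_prefix h hc with h1 | h1 <;> revert h1 <;> decide

theorem pv_tail_msgid (line : String) (h : PySem.Str.startswith line "msgid " = true) :
    pvTailA line = PySem.Str.strip (PySem.Str.slice line (some 6) none) := by
  simp only [PySem.Str.startswith_eq, PySem.Chars.startswith_iff] at h
  obtain ⟨rest, hr⟩ := h
  have hl : line.toList = ['m','s','g','i','d'] ++ ' ' :: rest := by rw [← hr]; rfl
  have hsplit : PySem.Chars.splitMax? line.toList [' '] 1
      = some [['m','s','g','i','d'], rest] := by
    rw [hl]; exact pv_splitMax_prefix _ rest (by decide)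
  unfold pvTailA
  rw [show ((PySem.Str.splitMax? line " " 1).getD [])
      = [String.ofList ['m','s','g','i','d'], String.ofList rest] by
    simp [PySem.Str.splitMax?, show (" ".toList) = [' '] from rfl, hsplit]]
  rw [show PySem.List.pyGetD [String.ofList ['m','s','g','i','d'], String.ofList rest] 1 ""
      = String.ofList rest by simp [PySem.List.pyGetD, PySem.List.pyGet?, PySem.List.pyIdx?]]
  have harg : rest = PySem.Chars.slice line.toList (some 6) none := by simp [pysem, hl]
  rw [show String.ofList rest = PySem.Str.slice line (some 6) none from by
    unfold PySem.Str.slice; rw [← harg]]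

theorem pv_tail_msgstr (line : String) (h : PySem.Str.startswith line "msgstr " = true) :
    pvTailA line = PySem.Str.strip (PySem.Str.slice line (some 7) none) := by
  simp only [PySem.Str.startswith_eq, PySem.Chars.startswith_iff] at h
  obtain ⟨rest, hr⟩ := h
  have hl : line.toList = ['m','s','g','s','t','r'] ++ ' ' :: rest := by rw [← hr]; rfl
  have hsplit : PySem.Chars.splitMax? line.toList [' '] 1
      = some [['m','s','g','s','t','r'], rest] := by
    rw [hl]; exact pv_splitMax_prefix _ rest (by decide)
  unfold pvTailA
  rw [show ((PySem.Str.splitMax? line " " 1).getD [])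
      = [String.ofList ['m','s','g','s','t','r'], String.ofList rest] by
    simp [PySem.Str.splitMax?, show (" ".toList) = [' '] from rfl, hsplit]]
  rw [show PySem.List.pyGetD [String.ofList ['m','s','g','s','t','r'], String.ofList rest] 1 ""
      = String.ofList rest by simp [PySem.List.pyGetD, PySem.List.pyGet?, PySem.List.pyIdx?]]
  have harg : rest = PySem.Chars.slice line.toList (some 7) none := by simp [pysem, hl]
  rw [show String.ofList rest = PySem.Str.slice line (some 7) none from by
    unfold PySem.Str.slice; rw [← harg]]

theorem pv_inv_step (st : Option Int × Option Int × String × String) (p : Int × String)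
    (hst : pvInv st) : pvInv (pvStepB st p) := by
  obtain ⟨i1, i2, v1, v2⟩ := st
  obtain ⟨h1, h2⟩ := hst
  unfold pvInv pvStepB
  split_ifs <;> simp_all

theorem pv_full_merge (st' r : Option Int × Option Int × String × String)
    (h1 : st'.1.isSome) (h2 : st'.2.1.isSome) : pvMerge st' r = st' := by
  simp [pvMerge, h1, h2]

theorem pv_step_merge (p : Int × String) (st r : Option Int × Option Int × String × String)
    (hst : pvInv st) :
    pvMerge (pvStepB st p) r = pvMerge st (pvStepA r p) := by
  obtain ⟨i, line⟩ := p
  obtain ⟨i1, i2, v1, v2⟩ := st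
  obtain ⟨h1, h2⟩ := hst
  simp only at h1 h2
  by_cases c1 : PySem.Str.startswith line "msgid " = true
  · have c2 := pv_not_both line c1
    cases i1 <;> cases i2 <;>
      simp_all [pvStepB, pvStepA, pvMerge, pv_tail_msgid line c1]
  · by_cases c2 : PySem.Str.startswith line "msgstr " = true
    · cases i1 <;> cases i2 <;>
        simp_all [pvStepB, pvStepA, pvMerge, pv_tail_msgstr line c2]
    · cases i1 <;> cases i2 <;> simp_all [pvStepB, pvStepA, pvMerge]

theorem pv_main (l : List (Int × String)) (st : Option Int × Option Int × String × String)
    (hst : pvInv st) :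
    pvAltGo l st = pvMerge st (l.reverse.foldl pvStepA (none, none, "", "")) := by
  induction l generalizing st with
  | nil =>
    obtain ⟨i1, i2, v1, v2⟩ := st
    obtain ⟨h1, h2⟩ := hst
    cases i1 <;> cases i2 <;> simp_all [pvAltGo, pvMerge]
  | cons p l ih =>
    rw [List.reverse_cons, List.foldl_append, List.foldl_cons, List.foldl_nil]
    simp only [pvAltGo]
    by_cases hb : (pvStepB st p).1.isSome ∧ (pvStepB st p).2.1.isSome
    · rw [if_pos hb, ← pv_full_merge (pvStepB st p) (l.reverse.foldl pvStepA (none, none, "", "")) hb.1 hb.2,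
        pv_step_merge p st _ hst]
    · rw [if_neg hb, ih (pvStepB st p) (pv_inv_step st p hst), pv_step_merge p st _ hst]

theorem pv_merge_init (r : Option Int × Option Int × String × String) :
    pvMerge (none, none, "", "") r = r := by
  simp [pvMerge]

-- ===== VERDICT (by name: the statement is the Claim_ definition above) =====
theorem extract_msgid_msgstr_spec : Claim_equal_extract_msgid_msgstr := by
  intro block _
  unfold Spec_extract_msgid_msgstr extract_msgid_msgstr extract_msgid_msgstr_alt
  rw [pv_main _ _ (by simp [pvInv]), List.reverse_reverse, pv_merge_init]
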